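-- pv_equiv track=rewrite | github.com/tansey-lab/nuc2seg | src/nuc2seg/unet_model.py | equal_length_splits
-- ===== SOURCE A (Python) =====
-- def equal_length_splits(total_size: int, n_splits: int) -> list[list[int]]:
--     """
--     Create a list of roughly equal integer splits that sum to total_size.
--
--     Args:
--         total_size: Total number of items to split
--         n_splits: Number of groups to split into
--
--     Returns:
--         List of integer lengths that sum to total_size
--
--     Example:
--         >>> equal_length_splits(100, 3)
--         [34, 33, 33]
--         >>> equal_length_splits(10, 3)
--         [4, 3, 3]
--     """
--     base_size = total_size // n_splits
--     remainder = total_size % n_splits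
--
--     # First 'remainder' groups get an extra item to distribute the remainder
--     sizes = [base_size + 1 if i < remainder else base_size for i in range(n_splits)]
--
--     idx_gen = iter(range(total_size))
--
--     output = []
--
--     for s in sizes:
--         output.append([next(idx_gen) for _ in range(s)])
--     return output
-- ===== SOURCE B (Python) =====
-- def equal_length_splits(total_size: int, n_splits: int) -> list[list[int]]:
--     base = total_size // n_splits
--     rem = total_size % n_splits
--     out = []
--     for i in range(n_splits):
--         start = i * base + min(i, rem)
--         end = (i + 1) * base + min(i + 1, rem)
--         out.append(list(range(start, end)))
--     return out
-- ===== Notes on version B (the rewrite author's own statement) =====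
-- stated objective: simpler
-- what changed: Dropped the sizes list and the shared index generator: each group's index window is computed arithmetically as range(i*base+min(i,rem), (i+1)*base+min(i+1,rem)) in a single loop.
import Mathlib
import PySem

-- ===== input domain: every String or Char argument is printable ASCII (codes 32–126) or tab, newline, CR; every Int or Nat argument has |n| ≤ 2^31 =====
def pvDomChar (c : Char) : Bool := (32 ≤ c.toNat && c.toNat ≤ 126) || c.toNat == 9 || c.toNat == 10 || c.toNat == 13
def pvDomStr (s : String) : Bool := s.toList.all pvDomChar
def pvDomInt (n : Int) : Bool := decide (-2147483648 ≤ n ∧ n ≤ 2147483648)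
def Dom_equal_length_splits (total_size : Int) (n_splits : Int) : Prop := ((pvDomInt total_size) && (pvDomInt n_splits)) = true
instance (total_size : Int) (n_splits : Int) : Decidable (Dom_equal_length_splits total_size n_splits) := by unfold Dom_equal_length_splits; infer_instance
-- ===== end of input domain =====

-- B replaces A's shared index generator and sizes list by direct arithmetic: group i is
-- range(i*base+min(i,rem), (i+1)*base+min(i+1,rem)) — objective: simpler.

-- ===== PORT A =====
-- the generator iter(range(total_size)) is modelled by its next index (an Int counter);
-- the proof shows A, on Pre_, never consumes past total_size, so next() never raises.
def equal_length_splits (total_size : Int) (n_splits : Int) : List (List Int) :=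
  let base_size := PySem.Int.floordiv total_size n_splits
  let remainder := PySem.Int.mod total_size n_splits
  let sizes := (PySem.List.pyRange 0 n_splits 1).map
      (fun i => if i < remainder then base_size + 1 else base_size)
  let r := sizes.foldl
      (fun (st : Int × List (List Int)) s =>
        let g := (PySem.List.pyRange 0 s 1).foldl
            (fun (p : Int × List Int) _ => (p.1 + 1, p.2 ++ [p.1])) (st.1, ([] : List Int))
        (g.1, st.2 ++ [g.2])) (0, [])
  r.2

-- ===== PORT B =====
def equal_length_splits_alt (total_size : Int) (n_splits : Int) : List (List Int) :=
  let base := PySem.Int.floordiv total_size n_splits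
  let rem := PySem.Int.mod total_size n_splits
  (PySem.List.pyRange 0 n_splits 1).foldl
    (fun out i =>
      out ++ [PySem.List.pyRange (i * base + min i rem) ((i + 1) * base + min (i + 1) rem) 1]) []

-- ===== PRECONDITION & SPEC =====
-- n_splits = 0 makes Python's '//' raise ZeroDivisionError; excluded.
def Pre_equal_length_splits (total_size : Int) (n_splits : Int) : Prop := n_splits ≠ 0
instance (total_size : Int) (n_splits : Int) : Decidable (Pre_equal_length_splits total_size n_splits) := by unfold Pre_equal_length_splits; infer_instance
def pvWitness_equal_length_splits : Int × Int := (10, 3)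

def Spec_equal_length_splits (total_size : Int) (n_splits : Int) (out : List (List Int)) : Prop := out = equal_length_splits_alt total_size n_splits
instance (total_size : Int) (n_splits : Int) (out : List (List Int)) : Decidable (Spec_equal_length_splits total_size n_splits out) := by unfold Spec_equal_length_splits; infer_instance

-- ===== CLAIM (what is proved, stated in full; the proofs are below) =====
def Claim_equal_equal_length_splits : Prop := ∀ (total_size : Int) (n_splits : Int), Dom_equal_length_splits total_size n_splits → Pre_equal_length_splits total_size n_splits → Spec_equal_length_splits total_size n_splits (equal_length_splits total_size n_splits)

-- ===== LEMMAS AND PROOFS =====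

-- A's inner comprehension: consuming s items from the counter c yields range(c, c+s) (s ≥ 0).
theorem pv_inner_nat (k : Nat) (c : Int) (L : List Int) :
    (PySem.List.pyRange 0 (k : Int) 1).foldl
      (fun (p : Int × List Int) _ => (p.1 + 1, p.2 ++ [p.1])) (c, L)
    = (c + k, L ++ PySem.List.pyRange c (c + k) 1) := by
  induction k generalizing L with
  | zero => simp [PySem.List.pyRange_one_eq_nil]
  | succ k ih =>
    have h1 : ((k + 1 : Nat) : Int) = (k : Int) + 1 := by push_cast; ring
    rw [h1, PySem.List.pyRange_one_succ_right (by positivity),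
        List.foldl_append, ih]
    have h2 : c + ((k : Int) + 1) = (c + k) + 1 := by ring
    rw [h2, PySem.List.pyRange_one_succ_right (by omega)]
    simp

theorem pv_inner (s : Int) (hs : 0 ≤ s) (c : Int) (L : List Int) :
    (PySem.List.pyRange 0 s 1).foldl
      (fun (p : Int × List Int) _ => (p.1 + 1, p.2 ++ [p.1])) (c, L)
    = (c + s, L ++ PySem.List.pyRange c (c + s) 1) := by
  lift s to Nat using hs
  exact pv_inner_nat s c L

theorem pv_inner_neg (s : Int) (hs : s ≤ 0) (c : Int) (L : List Int) :
    (PySem.List.pyRange 0 s 1).foldl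
      (fun (p : Int × List Int) _ => (p.1 + 1, p.2 ++ [p.1])) (c, L) = (c, L) := by
  rw [PySem.List.pyRange_one_eq_nil hs]; rfl

-- the B-side start/end arithmetic, shared by the two outer invariants
theorem pv_f_step (base rem i : Int) :
    i * base + min i rem + (if i < rem then base + 1 else base)
      = (i + 1) * base + min (i + 1) rem := by
  have hmul : (i + 1) * base = i * base + base := by ring
  rw [hmul]; split_ifs with hi <;> omega

-- outer loop, total_size ≥ 0 (all sizes ≥ 0): counter i sits at i*base+min(i,rem)
theorem pv_outer_pos (base rem : Int) (hb : 0 ≤ base) (hr : 0 ≤ rem) (k : Nat) :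
    ((PySem.List.pyRange 0 (k : Int) 1).map
        (fun i => if i < rem then base + 1 else base)).foldl
      (fun (st : Int × List (List Int)) s =>
        let g := (PySem.List.pyRange 0 s 1).foldl
            (fun (p : Int × List Int) _ => (p.1 + 1, p.2 ++ [p.1])) (st.1, ([] : List Int))
        (g.1, st.2 ++ [g.2])) (0, [])
    = ((k : Int) * base + min (k : Int) rem,
       (PySem.List.pyRange 0 (k : Int) 1).map
         (fun i => PySem.List.pyRange (i * base + min i rem)
                     ((i + 1) * base + min (i + 1) rem) 1)) := by
  induction k with
  | zero =>
    simp [PySem.List.pyRange_one_eq_nil]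
    omega
  | succ k ih =>
    have h1 : ((k + 1 : Nat) : Int) = (k : Int) + 1 := by push_cast; ring
    rw [h1, PySem.List.pyRange_one_succ_right (by positivity), List.map_append,
        List.foldl_append, ih]
    simp only [List.map_cons, List.map_nil, List.foldl_cons, List.foldl_nil]
    have hsz : (0:Int) ≤ (if (k:Int) < rem then base + 1 else base) := by
      split_ifs <;> omega
    rw [pv_inner _ hsz]
    have hf := pv_f_step base rem (k:Int)
    simp only [Prod.mk.injEq, List.map_append, List.map_cons, List.map_nil,
      List.nil_append]
    exact ⟨hf, by rw [hf]⟩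

-- outer loop, total_size < 0 (all sizes ≤ 0): every group is empty, counter stays 0
theorem pv_outer_neg (base rem : Int) (hb : base < 0) (k : Nat) :
    ((PySem.List.pyRange 0 (k : Int) 1).map
        (fun i => if i < rem then base + 1 else base)).foldl
      (fun (st : Int × List (List Int)) s =>
        let g := (PySem.List.pyRange 0 s 1).foldl
            (fun (p : Int × List Int) _ => (p.1 + 1, p.2 ++ [p.1])) (st.1, ([] : List Int))
        (g.1, st.2 ++ [g.2])) (0, [])
    = (0, (PySem.List.pyRange 0 (k : Int) 1).map (fun _ => ([] : List Int))) := by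
  induction k with
  | zero => simp [PySem.List.pyRange_one_eq_nil]
  | succ k ih =>
    have h1 : ((k + 1 : Nat) : Int) = (k : Int) + 1 := by push_cast; ring
    rw [h1, PySem.List.pyRange_one_succ_right (by positivity), List.map_append,
        List.foldl_append, ih]
    simp only [List.map_cons, List.map_nil, List.foldl_cons, List.foldl_nil]
    rw [pv_inner_neg _ (by split_ifs <;> omega)]
    simp

-- B's fold-with-append is the map of the loop body
theorem pv_alt_eq_map (total_size n_splits : Int) :
    equal_length_splits_alt total_size n_splits
    = (PySem.List.pyRange 0 n_splits 1).map
        (fun i => PySem.List.pyRange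
           (i * PySem.Int.floordiv total_size n_splits + min i (PySem.Int.mod total_size n_splits))
           ((i + 1) * PySem.Int.floordiv total_size n_splits + min (i + 1) (PySem.Int.mod total_size n_splits)) 1) := by
  rw [equal_length_splits_alt, PySem.List.foldl_append_singleton_eq_map]
  simp

-- ===== VERDICT (by name: the statement is the Claim_ definition above) =====
theorem equal_length_splits_spec : Claim_equal_equal_length_splits := by
  intro ts n _ hn
  unfold Spec_equal_length_splits
  rw [pv_alt_eq_map]
  rcases lt_trichotomy n 0 with hneg | hz | hpos
  · simp [equal_length_splits, PySem.List.pyRange_one_eq_nil (le_of_lt hneg)]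
  · exact absurd hz hn
  · set base := PySem.Int.floordiv ts n with hbase
    set rem := PySem.Int.mod ts n with hrem
    have hr : 0 ≤ rem := PySem.Int.mod_nonneg ts hpos
    have hk : n = ((n.toNat : Nat) : Int) := by omega
    by_cases hb : 0 ≤ base
    · have := pv_outer_pos base rem hb hr n.toNat
      simp only [equal_length_splits, ← hbase, ← hrem, ← hk] at this ⊢
      rw [this]
    · have hb' : base < 0 := by omega
      have := pv_outer_neg base rem hb' n.toNat
      simp only [equal_length_splits, ← hbase, ← hrem, ← hk] at this ⊢
      rw [this]
      apply List.map_congr_left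
      intro i hi
      have hi' := (PySem.List.mem_pyRange_one).1 hi
      have hsz : (i + 1) * base + min (i + 1) rem ≤ i * base + min i rem := by
        have := pv_f_step base rem i
        split_ifs at this <;> omega
      rw [PySem.List.pyRange_one_eq_nil hsz]
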